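-- pv_equiv track=rewrite | github.com/TristanB22/ElectionAndEconSim | Utils/calibration/census_calibration.py | _derive_vehicle_categories
-- ===== SOURCE A (Python) =====
-- from typing import Any, Dict, Iterable, List, Optional, Tuple, Set
--
-- def _derive_vehicle_categories(label_map: Dict[str, str]) -> Dict[str, str]:
--     """
--     Derive vehicle availability categories from ACS B08201 metadata.
--
--     Prefers the shallowest hierarchy (fewest segments) that still maps to the
--     canonical bucket labels, so we capture total household counts rather than
--     race/tenure breakdowns when available.
--     """
--     category_aliases = {
--         'none': ('no vehicle available',),
--         'one': ('1 vehicle available', 'one vehicle available'),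
--         'two': ('2 vehicles available',),
--         'three_plus': ('3 or more vehicles available', '3+ vehicles available'),
--     }
--
--     def detect_category(segment: str) -> Optional[str]:
--         lower = segment.lower()
--         for category, aliases in category_aliases.items():
--             if any(alias in lower for alias in aliases):
--                 return category
--         return None
--
--     category_candidates: Dict[str, Tuple[Tuple[int, int], str]] = {}
--
--     for var_code, label in label_map.items():
--         if not var_code.endswith('E') or var_code.endswith('_001E'):
--             continue
--         segments = [seg.strip() for seg in label.split('!!') if seg.strip()]
--         if not segments:
--             continue
--         category = detect_category(segments[-1])
--         if not category:
--             continue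
--
--         depth = len(segments)
--         penalty = sum(
--             1
--             for seg in segments[:-1]
--             if 'total' not in seg.lower() and 'occupied housing units' not in seg.lower()
--         )
--         score = (depth, penalty)
--
--         current = category_candidates.get(category)
--         if current is None or score < current[0]:
--             category_candidates[category] = (score, var_code)
--
--     return {category: var_code for category, (_, var_code) in category_candidates.items()}
-- ===== SOURCE B (Python) =====
-- def _derive_vehicle_categories(label_map):
--     """Sort-based rewrite: parse every candidate into a record, rank all records
--     with one stable sort on (depth, penalty), and let the first-ranked record of
--     each category win; categories keep their first-encounter order."""
--     category_aliases = {
--         'none': ('no vehicle available',),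
--         'one': ('1 vehicle available', 'one vehicle available'),
--         'two': ('2 vehicles available',),
--         'three_plus': ('3 or more vehicles available', '3+ vehicles available'),
--     }
--
--     def detect_category(segment):
--         lower = segment.lower()
--         for category, aliases in category_aliases.items():
--             if any(alias in lower for alias in aliases):
--                 return category
--         return None
--
--     def parse(var_code, label):
--         if not var_code.endswith('E') or var_code.endswith('_001E'):
--             return None
--         segments = [seg.strip() for seg in label.split('!!') if seg.strip()]
--         if not segments:
--             return None
--         category = detect_category(segments[-1])
--         if not category:
--             return None
--         penalty = sum(
--             1
--             for seg in segments[:-1]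
--             if 'total' not in seg.lower() and 'occupied housing units' not in seg.lower()
--         )
--         return (category, (len(segments), penalty), var_code)
--
--     records = [r for r in (parse(v, l) for v, l in label_map.items()) if r is not None]
--
--     ranked = sorted(records, key=lambda r: r[1])
--     winners = {}
--     for category, _score, var_code in ranked:
--         winners.setdefault(category, var_code)
--
--     return {category: winners[category] for category in dict.fromkeys(r[0] for r in records)}
-- ===== Notes on version B (the rewrite author's own statement) =====
-- stated objective: alternative
-- what changed: A keeps a running best (score, var_code) per category in a dict while scanning; B never compares scores itself: it parses all candidates into records, ranks them with one stable sort on (depth, penalty), takes the first-ranked record per category via setdefault, and emits categories in first-encounter order.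
import Mathlib
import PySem

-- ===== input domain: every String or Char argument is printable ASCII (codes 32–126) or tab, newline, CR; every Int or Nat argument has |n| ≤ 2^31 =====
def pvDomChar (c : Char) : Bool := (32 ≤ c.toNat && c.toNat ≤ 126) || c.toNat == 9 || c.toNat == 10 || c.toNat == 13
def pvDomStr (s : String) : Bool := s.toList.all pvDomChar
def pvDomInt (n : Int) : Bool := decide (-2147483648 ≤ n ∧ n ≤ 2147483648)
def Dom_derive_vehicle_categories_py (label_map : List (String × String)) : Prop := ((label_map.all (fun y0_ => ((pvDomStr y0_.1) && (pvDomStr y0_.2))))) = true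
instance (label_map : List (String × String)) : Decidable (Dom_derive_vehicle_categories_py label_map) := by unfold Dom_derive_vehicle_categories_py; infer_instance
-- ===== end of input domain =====

-- B replaces A's running-best-per-category dict with one stable sort of all parsed
-- records by (depth, penalty) followed by a first-hit-per-category scan (alternative
-- algorithm, same results).

-- shared helper: the category aliases table and detect_category (identical in both Pythons)
def pvCategoryAliases : List (String × List String) :=
  [("none", ["no vehicle available"]),
   ("one", ["1 vehicle available", "one vehicle available"]),
   ("two", ["2 vehicles available"]),
   ("three_plus", ["3 or more vehicles available", "3+ vehicles available"])]

def pvDetectCategory (segment : String) : Option String :=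
  match pvCategoryAliases.find? (fun p => p.2.any (fun al => PySem.Str.isIn al (PySem.Str.lower segment))) with
  | some p => some p.1
  | none => none

-- 'total' not in seg.lower() and 'occupied housing units' not in seg.lower()
def pvPenaltySeg (seg : String) : Bool :=
  !(PySem.Str.isIn "total" (PySem.Str.lower seg)) && !(PySem.Str.isIn "occupied housing units" (PySem.Str.lower seg))

-- the parsed segment list [seg.strip() for seg in label.split('!!') if seg.strip()]
def pvSegments (label : String) : List String :=
  (((PySem.Str.split? label "!!").getD []).map PySem.Str.strip).filter (fun s => !s.toList.isEmpty)

-- ===== PORT A =====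
def derive_vehicle_categories_py (label_map : List (String × String)) : List (String × String) :=
  (label_map.foldl (fun (d : PySem.Dict String ((Int × Int) × String)) p =>
      if !(PySem.Str.endswith p.1 "E") || PySem.Str.endswith p.1 "_001E" then d
      else if (pvSegments p.2).isEmpty then d
      else
        match pvDetectCategory ((PySem.List.pyGet? (pvSegments p.2) (-1)).getD "") with
        | none => d
        | some category =>
          match d.get? category with
          | none =>
            d.insert category
              ((((pvSegments p.2).length : Int),
                (((PySem.List.slice (pvSegments p.2) none (some (-1))).countP pvPenaltySeg : Nat) : Int)), p.1)
          | some current =>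
            if ((pvSegments p.2).length : Int) < current.1.1 ∨
               (((pvSegments p.2).length : Int) = current.1.1 ∧
                ((((PySem.List.slice (pvSegments p.2) none (some (-1))).countP pvPenaltySeg : Nat) : Int) < current.1.2)) then
              d.insert category
                ((((pvSegments p.2).length : Int),
                  (((PySem.List.slice (pvSegments p.2) none (some (-1))).countP pvPenaltySeg : Nat) : Int)), p.1)
            else d)
    PySem.Dict.empty).items.map (fun q => (q.1, q.2.2))

-- ===== PORT B =====
-- B's 'parse' helper: one candidate record (category, (depth, penalty), var_code), or None
def pvRecord? (var_code label : String) : Option (String × (Int × Int) × String) :=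
  if !(PySem.Str.endswith var_code "E") || PySem.Str.endswith var_code "_001E" then none
  else if (pvSegments label).isEmpty then none
  else
    match pvDetectCategory ((PySem.List.pyGet? (pvSegments label) (-1)).getD "") with
    | none => none
    | some category =>
      some (category,
            (((pvSegments label).length : Int),
             (((PySem.List.slice (pvSegments label) none (some (-1))).countP pvPenaltySeg : Nat) : Int)),
            var_code)

def derive_vehicle_categories_py_alt (label_map : List (String × String)) : List (String × String) :=
  let records := label_map.filterMap (fun p => pvRecord? p.1 p.2)
  let ranked := PySem.List.sorted2 records (fun r => r.2.1.1) (fun r => r.2.1.2)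
  let winners := ranked.foldl (fun (d : PySem.Dict String String) r => d.setdefault r.1 r.2.2) PySem.Dict.empty
  -- winners[category] in the final dict comprehension: the key is always present
  -- (every deduped category came from a record, and ranked is a permutation of records),
  -- so the KeyError branch is unreachable; ported with getD "".
  (PySem.List.dedup (records.map (fun r => r.1))).map (fun c => (c, (winners.get? c).getD ""))

-- ===== PRECONDITION & SPEC =====
def Spec_derive_vehicle_categories_py (label_map : List (String × String)) (out : List (String × String)) : Prop := out = derive_vehicle_categories_py_alt label_map
instance (label_map : List (String × String)) (out : List (String × String)) : Decidable (Spec_derive_vehicle_categories_py label_map out) := by unfold Spec_derive_vehicle_categories_py; infer_instance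

-- ===== CLAIM (what is proved, stated in full; the proofs are below) =====
def Claim_equal_derive_vehicle_categories_py : Prop := ∀ (label_map : List (String × String)), Dom_derive_vehicle_categories_py label_map → Spec_derive_vehicle_categories_py label_map (derive_vehicle_categories_py label_map)

-- ===== LEMMAS AND PROOFS =====

-- Python's lexicographic '<' on (depth, penalty) score pairs, as sorted2/min compare them
def pvLt (p q : Int × Int) : Bool :=
  decide (p.1 < q.1) || (!decide (q.1 < p.1) && decide (p.2 < q.2))

-- record-level comparison (records are (category, score, var_code))
def pvLtR (r s : String × (Int × Int) × String) : Bool := pvLt r.2.1 s.2.1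

theorem pvLt_iff (p q : Int × Int) :
    pvLt p q = true ↔ (p.1 < q.1 ∨ (p.1 = q.1 ∧ p.2 < q.2)) := by
  simp only [pvLt, Bool.or_eq_true, Bool.and_eq_true, Bool.not_eq_true', decide_eq_true_eq,
    decide_eq_false_iff_not]
  constructor <;> (intro h; omega)

theorem pvLt_false_iff (p q : Int × Int) :
    pvLt p q = false ↔ ¬(p.1 < q.1 ∨ (p.1 = q.1 ∧ p.2 < q.2)) := by
  rw [← pvLt_iff]
  cases h : pvLt p q <;> simp

theorem pvLt_asymm {p q : Int × Int} (h : pvLt p q = true) : pvLt q p = false := by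
  rw [pvLt_iff] at h
  rw [pvLt_false_iff]
  omega

theorem pvLt_of_lt_of_nlt {p q r : Int × Int} (h1 : pvLt p q = true) (h2 : pvLt r q = false) :
    pvLt p r = true := by
  rw [pvLt_iff] at h1 ⊢
  rw [pvLt_false_iff] at h2
  omega

-- A's per-record action on the candidates dict
def pvStepA (d : PySem.Dict String ((Int × Int) × String))
    (r : String × (Int × Int) × String) : PySem.Dict String ((Int × Int) × String) :=
  match d.get? r.1 with
  | none => d.insert r.1 (r.2.1, r.2.2)
  | some current =>
    if r.2.1.1 < current.1.1 ∨ (r.2.1.1 = current.1.1 ∧ r.2.1.2 < current.1.2) then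
      d.insert r.1 (r.2.1, r.2.2)
    else d

-- the first record of g attaining g's minimal score (A's winning candidate)
def pvArg (g : List (String × (Int × Int) × String)) : String × (Int × Int) × String :=
  match g with
  | [] => ("", (0, 0), "")
  | x :: t => t.foldl (fun m r => if pvLtR r m then r else m) x

-- the records of one category, in encounter order
def pvGrp (c : String) (rs : List (String × (Int × Int) × String)) :
    List (String × (Int × Int) × String) :=
  rs.filter (fun r => r.1 == c)

-- B's insertion sort, as a named fold
def pvS (rs : List (String × (Int × Int) × String)) : List (String × (Int × Int) × String) :=
  rs.foldl (fun acc x => PySem.List.insertBy pvLtR x acc) []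

theorem pvArg_append (g : List (String × (Int × Int) × String)) (x) (h : g ≠ []) :
    pvArg (g ++ [x]) = if pvLtR x (pvArg g) then x else pvArg g := by
  cases g with
  | nil => exact absurd rfl h
  | cons y t => simp [pvArg, List.foldl_append]

theorem pvS_sorted2 (rs : List (String × (Int × Int) × String)) :
    PySem.List.sorted2 rs (fun r => r.2.1.1) (fun r => r.2.1.2) = pvS rs := rfl

theorem insertBy_head (x : String × (Int × Int) × String) (m)
    (h : ∀ z ∈ m, pvLtR x z = true) :
    PySem.List.insertBy pvLtR x m = x :: m := by
  cases m with
  | nil => rfl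
  | cons y ys => simp [PySem.List.insertBy, h y (List.mem_cons_self)]

theorem insertBy_pairwise (x : String × (Int × Int) × String) (l)
    (h : l.Pairwise (fun a b => pvLtR b a = false)) :
    (PySem.List.insertBy pvLtR x l).Pairwise (fun a b => pvLtR b a = false) := by
  induction l with
  | nil => simp [PySem.List.insertBy]
  | cons y ys ih =>
    rcases List.pairwise_cons.mp h with ⟨hy, hys⟩
    by_cases hxy : pvLtR x y = true
    · rw [show PySem.List.insertBy pvLtR x (y :: ys) = x :: y :: ys by
        simp [PySem.List.insertBy, hxy]]
      refine List.pairwise_cons.mpr ⟨?_, h⟩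
      intro z hz
      rcases List.mem_cons.mp hz with rfl | hz
      · exact pvLt_asymm hxy
      · exact pvLt_asymm (pvLt_of_lt_of_nlt hxy (hy z hz))
    · rw [show PySem.List.insertBy pvLtR x (y :: ys) = y :: PySem.List.insertBy pvLtR x ys by
        simp [PySem.List.insertBy, hxy]]
      refine List.pairwise_cons.mpr ⟨?_, ih hys⟩
      intro z hz
      rcases (PySem.List.mem_insertBy pvLtR x z ys).mp hz with rfl | hz
      · exact Bool.eq_false_iff.mpr hxy
      · exact hy z hz

theorem filter_insertBy (p : (String × (Int × Int) × String) → Bool) (x l)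
    (h : l.Pairwise (fun a b => pvLtR b a = false)) :
    (PySem.List.insertBy pvLtR x l).filter p
      = if p x then PySem.List.insertBy pvLtR x (l.filter p) else l.filter p := by
  induction l with
  | nil =>
    simp only [PySem.List.insertBy, List.filter_nil]
    by_cases hpx : p x <;> simp [List.filter, hpx]
  | cons y ys ih =>
    rcases List.pairwise_cons.mp h with ⟨hy, hys⟩
    by_cases hxy : pvLtR x y = true
    · rw [show PySem.List.insertBy pvLtR x (y :: ys) = x :: y :: ys by
        simp [PySem.List.insertBy, hxy]]
      by_cases hpx : p x
      · rw [if_pos hpx]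
        have hhead : PySem.List.insertBy pvLtR x ((y :: ys).filter p) = x :: (y :: ys).filter p := by
          apply insertBy_head
          intro z hz
          rcases List.mem_cons.mp (List.mem_of_mem_filter hz) with rfl | hz'
          · exact hxy
          · exact pvLt_of_lt_of_nlt hxy (hy z hz')
        rw [hhead, List.filter_cons_of_pos hpx]
      · rw [if_neg hpx, List.filter_cons_of_neg hpx]
    · rw [show PySem.List.insertBy pvLtR x (y :: ys) = y :: PySem.List.insertBy pvLtR x ys by
        simp [PySem.List.insertBy, hxy]]
      by_cases hpy : p y
      · rw [List.filter_cons_of_pos hpy, ih hys, List.filter_cons_of_pos hpy]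
        by_cases hpx : p x
        · rw [if_pos hpx, if_pos hpx,
            show PySem.List.insertBy pvLtR x (y :: ys.filter p)
              = y :: PySem.List.insertBy pvLtR x (ys.filter p) by
              simp [PySem.List.insertBy, hxy]]
        · rw [if_neg hpx, if_neg hpx]
      · rw [List.filter_cons_of_neg hpy, ih hys, List.filter_cons_of_neg hpy]

theorem pvS_append (rs : List (String × (Int × Int) × String)) (x) :
    pvS (rs ++ [x]) = PySem.List.insertBy pvLtR x (pvS rs) := by
  simp [pvS, List.foldl_append]

theorem pvS_pairwise (rs : List (String × (Int × Int) × String)) :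
    (pvS rs).Pairwise (fun a b => pvLtR b a = false) := by
  induction rs using List.reverseRecOn with
  | nil => simp [pvS]
  | append_singleton t x ih => rw [pvS_append]; exact insertBy_pairwise x (pvS t) ih

theorem filter_pvS (p : (String × (Int × Int) × String) → Bool)
    (rs : List (String × (Int × Int) × String)) :
    (pvS rs).filter p = pvS (rs.filter p) := by
  induction rs using List.reverseRecOn with
  | nil => simp [pvS]
  | append_singleton t x ih =>
    rw [pvS_append, filter_insertBy p x (pvS t) (pvS_pairwise t), ih, List.filter_append]
    by_cases hpx : p x
    · rw [if_pos hpx, show List.filter p [x] = [x] by simp [hpx], pvS_append]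
    · rw [if_neg hpx, show List.filter p [x] = [] by simp [hpx], List.append_nil]

theorem head?_pvS (g : List (String × (Int × Int) × String)) (h : g ≠ []) :
    (pvS g).head? = some (pvArg g) := by
  induction g using List.reverseRecOn with
  | nil => exact absurd rfl h
  | append_singleton t x ih =>
    rcases eq_or_ne t [] with rfl | ht
    · simp [pvS, PySem.List.insertBy, pvArg]
    · rw [pvS_append]
      obtain ⟨m, tt, hmt⟩ : ∃ m tt, pvS t = m :: tt := by
        cases hS : pvS t with
        | nil => rw [hS] at ih; exact absurd (ih ht) (by simp)
        | cons m tt => exact ⟨m, tt, rfl⟩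
      have hm : m = pvArg t := by
        have := ih ht; rw [hmt] at this; simpa using this
      rw [hmt, pvArg_append t x ht, ← hm]
      by_cases hlt : pvLtR x m = true
      · simp [PySem.List.insertBy, hlt]
      · simp [PySem.List.insertBy, hlt]

-- B's winners dict: first occurrence per category in the ranked list
theorem winners_get? (l : List (String × (Int × Int) × String)) (c : String) :
    (l.foldl (fun (d : PySem.Dict String String) r => d.setdefault r.1 r.2.2)
        PySem.Dict.empty).get? c
      = (l.find? (fun r => r.1 == c)).map (fun r => r.2.2) := by
  induction l using List.reverseRecOn with
  | nil => rfl
  | append_singleton t r ih =>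
    rw [List.foldl_append, List.foldl_cons, List.foldl_nil, List.find?_append]
    by_cases hc : c = r.1
    · subst hc
      rw [PySem.Dict.get?_setdefault_self, ih]
      cases hf : t.find? (fun s => s.1 == r.1) with
      | none => simp [hf]
      | some m => simp [hf]
    · rw [PySem.Dict.get?_setdefault_of_ne _ _ hc, ih]
      have hr : (r.1 == c) = false := beq_eq_false_iff_ne.mpr (Ne.symm hc)
      have : List.find? (fun s => s.1 == c) [r] = none := by
        simp [List.find?, hr]
      rw [this, Option.or_none]

-- dedup of an appended element
theorem dedup_append_singleton (l : List String) (c : String) :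
    PySem.List.dedup (l ++ [c])
      = if c ∈ l then PySem.List.dedup l else PySem.List.dedup l ++ [c] := by
  have h1 : PySem.List.dedup (l ++ [c]) = PySem.Set.add (PySem.List.dedup l) c := by
    simp only [PySem.List.dedup, PySem.Set.ofList, List.foldl_append, List.foldl_cons,
      List.foldl_nil]
  rw [h1]
  unfold PySem.Set.add
  by_cases hm : c ∈ l
  · rw [if_pos hm, if_pos]
    simpa [List.contains_iff_mem, PySem.List.mem_dedup] using hm
  · rw [if_neg hm, if_neg]
    simpa [List.contains_iff_mem, PySem.List.mem_dedup] using hm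

-- find? over a key-indexed map
theorem find_map_keyed {ν : Type} (l : List String) (f : String → ν) (c : String) :
    ((l.map (fun k => (k, f k))).find? (fun q => q.1 == c))
      = if c ∈ l then some (c, f c) else none := by
  induction l with
  | nil => simp
  | cons k t ih =>
    by_cases hk : k = c
    · subst hk
      rw [List.map_cons, List.find?_cons_of_pos (by simp)]
      simp
    · rw [List.map_cons, List.find?_cons_of_neg (by simpa using hk), ih]
      by_cases hm : c ∈ t
      · simp [hm, List.mem_cons]
      · simp [hm, List.mem_cons, Ne.symm hk]

theorem pvGrp_append (c : String) (rs : List (String × (Int × Int) × String)) (r) :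
    pvGrp c (rs ++ [r]) = pvGrp c rs ++ (if r.1 == c then [r] else []) := by
  simp only [pvGrp, List.filter_append]
  congr 1
  by_cases h : (r.1 == c) = true <;> simp [List.filter, h]

theorem pvGrp_ne_nil (c : String) (rs : List (String × (Int × Int) × String))
    (h : c ∈ rs.map (fun r => r.1)) : pvGrp c rs ≠ [] := by
  intro hnil
  rcases List.mem_map.mp h with ⟨r, hr, hrc⟩
  have := List.filter_eq_nil_iff.mp hnil r hr
  simp [hrc] at this

theorem pvGrp_nil_of_not_mem (c : String) (rs : List (String × (Int × Int) × String))
    (h : c ∉ rs.map (fun r => r.1)) : pvGrp c rs = [] := by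
  apply List.filter_eq_nil_iff.mpr
  intro r hr
  simp only [Bool.not_eq_true, beq_eq_false_iff_ne]
  intro hrc
  exact h (List.mem_map.mpr ⟨r, hr, hrc⟩)

-- the A-side characterisation: A's dict is, per first-encountered category, the first
-- record attaining the minimal (depth, penalty) score of that category
theorem pv_A_items (rs : List (String × (Int × Int) × String)) :
    (rs.foldl pvStepA PySem.Dict.empty).items
      = (PySem.List.dedup (rs.map (fun r => r.1))).map
          (fun c => (c, ((pvArg (pvGrp c rs)).2.1, (pvArg (pvGrp c rs)).2.2))) := by
  induction rs using List.reverseRecOn with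
  | nil => rfl
  | append_singleton t r ih =>
    rw [List.foldl_append, List.foldl_cons, List.foldl_nil]
    set d := t.foldl pvStepA PySem.Dict.empty with hd
    have hget : ∀ c : String, d.get? c
        = if c ∈ t.map (fun r => r.1)
          then some ((pvArg (pvGrp c t)).2.1, (pvArg (pvGrp c t)).2.2) else none := by
      intro c
      show ((d.items.find? (fun p => p.1 == c)).map (fun x => x.2)) = _
      rw [ih, find_map_keyed]
      by_cases hm : c ∈ PySem.List.dedup (t.map (fun r => r.1))
      · rw [if_pos hm, if_pos ((PySem.List.mem_dedup _ _).mp hm)]; rfl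
      · rw [if_neg hm, if_neg (fun h => hm ((PySem.List.mem_dedup _ _).mpr h))]; rfl
    rw [List.map_append, show List.map (fun r => r.1) [r] = [r.1] by rfl,
      dedup_append_singleton]
    by_cases hmem : r.1 ∈ t.map (fun r => r.1)
    · -- the category already has a candidate
      rw [if_pos hmem]
      have hg := pvGrp_ne_nil r.1 t hmem
      have hgr : pvGrp r.1 (t ++ [r]) = pvGrp r.1 t ++ [r] := by
        rw [pvGrp_append]; simp
      have hgc : ∀ c : String, c ≠ r.1 → pvGrp c (t ++ [r]) = pvGrp c t := by
        intro c hc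
        rw [pvGrp_append]
        simp [beq_eq_false_iff_ne, Ne.symm hc]
      have hcont : d.contains r.1 = true := by
        rw [PySem.Dict.contains_eq_isSome_get?, hget, if_pos hmem]; rfl
      have hstep : pvStepA d r
          = if pvLtR r (pvArg (pvGrp r.1 t)) then d.insert r.1 (r.2.1, r.2.2) else d := by
        unfold pvStepA
        rw [hget, if_pos hmem]
        dsimp only
        by_cases hb : pvLtR r (pvArg (pvGrp r.1 t)) = true
        · rw [if_pos hb, if_pos]
          exact (pvLt_iff _ _).mp hb
        · rw [if_neg hb, if_neg]
          intro hcnd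
          exact hb ((pvLt_iff _ _).mpr hcnd)
      rw [hstep]
      by_cases hb : pvLtR r (pvArg (pvGrp r.1 t)) = true
      · rw [if_pos hb, PySem.Dict.items_insert_of_contains d _ hcont, ih, List.map_map]
        apply List.map_congr_left
        intro c hc
        by_cases hcr : c = r.1
        · subst hcr
          simp only [Function.comp_apply, BEq.rfl, if_pos]
          rw [hgr, pvArg_append _ _ hg, if_pos hb]
        · have : ((c, ((pvArg (pvGrp c t)).2.1, (pvArg (pvGrp c t)).2.2)).1 == r.1) = false := by
            simpa using hcr
          simp only [Function.comp_apply, this, Bool.false_eq_true, if_false]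
          rw [hgc c hcr]
      · rw [if_neg hb, ih]
        apply List.map_congr_left
        intro c hc
        by_cases hcr : c = r.1
        · subst hcr
          rw [hgr, pvArg_append _ _ hg, if_neg hb]
        · rw [hgc c hcr]
    · -- a fresh category is appended at the end
      rw [if_neg hmem]
      have hcont : d.contains r.1 = false := by
        rw [PySem.Dict.contains_eq_isSome_get?, hget, if_neg hmem]; rfl
      have hstep : pvStepA d r = d.insert r.1 (r.2.1, r.2.2) := by
        unfold pvStepA
        rw [hget, if_neg hmem]
      rw [hstep, PySem.Dict.items_insert_of_not_contains d _ hcont, ih, List.map_append]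
      congr 1
      · apply List.map_congr_left
        intro c hc
        have hcr : c ≠ r.1 := by
          intro h
          exact hmem (h ▸ (PySem.List.mem_dedup _ _).mp hc)
        rw [pvGrp_append]
        simp [beq_eq_false_iff_ne, Ne.symm hcr]
      · have : pvGrp r.1 (t ++ [r]) = [r] := by
          rw [pvGrp_append, pvGrp_nil_of_not_mem r.1 t hmem]; simp
        simp [this, pvArg]

-- a fold whose body skips unparsed elements is a fold over the filterMap
theorem pv_foldl_filterMap {α β σ : Type} (f : α → Option β) (g : σ → β → σ)
    (l : List α) (init : σ) :
    l.foldl (fun s a => (f a).elim s (g s)) init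
    = (l.filterMap f).foldl g init := by
  induction l generalizing init with
  | nil => rfl
  | cons a t ih =>
    cases h : f a <;> simp [h, ih]

-- A's literal fold over label_map is the pvStepA fold over the parsed records
set_option maxHeartbeats 1000000 in
theorem pv_A_eq_fold (label_map : List (String × String)) :
    derive_vehicle_categories_py label_map
    = ((label_map.filterMap (fun p => pvRecord? p.1 p.2)).foldl pvStepA
        PySem.Dict.empty).items.map (fun q => (q.1, q.2.2)) := by
  unfold derive_vehicle_categories_py
  rw [← pv_foldl_filterMap (fun p => pvRecord? p.1 p.2) pvStepA label_map PySem.Dict.empty]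
  congr 2
  apply PySem.List.foldl_congr_mem
  intro d p _
  unfold pvRecord?
  by_cases hc1 : (!(PySem.Str.endswith p.1 "E") || PySem.Str.endswith p.1 "_001E") = true
  · rw [if_pos hc1, if_pos hc1]; rfl
  · rw [if_neg hc1, if_neg hc1]
    by_cases hc2 : (pvSegments p.2).isEmpty = true
    · rw [if_pos hc2, if_pos hc2]; rfl
    · rw [if_neg hc2, if_neg hc2]
      cases hc3 : pvDetectCategory ((PySem.List.pyGet? (pvSegments p.2) (-1)).getD "") with
      | none => rfl
      | some category => rfl

-- ===== VERDICT (by name: the statement is the Claim_ definition above) =====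
set_option maxHeartbeats 1000000 in
theorem derive_vehicle_categories_py_spec : Claim_equal_derive_vehicle_categories_py := by
  intro label_map _hdom
  unfold Spec_derive_vehicle_categories_py
  simp only [derive_vehicle_categories_py_alt]
  rw [pv_A_eq_fold]
  generalize (label_map.filterMap (fun p => pvRecord? p.1 p.2)) = rs
  rw [pv_A_items, List.map_map, pvS_sorted2]
  apply List.map_congr_left
  intro c hc
  have hmem : c ∈ rs.map (fun r => r.1) := (PySem.List.mem_dedup _ _).mp hc
  have hg := pvGrp_ne_nil c rs hmem
  simp only [Function.comp_apply]
  rw [winners_get?, ← List.head?_filter, filter_pvS,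
    show List.filter (fun r => r.1 == c) rs = pvGrp c rs from rfl, head?_pvS _ hg]
  rfl
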